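-- pv_equiv track=rewrite | github.com/yozerizki/smart-opex | backend/scripts/ocr/paddle_ocr.py | select_totals
-- ===== SOURCE A (Python) =====
-- from typing import Any, Dict, List, Tuple
--
-- def select_totals(candidates: List[Dict[str, Any]], page_height: int) -> List[Dict[str, Any]]:
--     if not candidates:
--         return []
--
--     candidates.sort(key=lambda c: c["y"])
--     gap = max(80, int(page_height * 0.15))
--     clusters: List[List[Dict[str, Any]]] = []
--     current: List[Dict[str, Any]] = []
--     last_y = None
--
--     for cand in candidates:
--         if last_y is None or (cand["y"] - last_y) <= gap:
--             current.append(cand)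
--         else:
--             clusters.append(current)
--             current = [cand]
--         last_y = cand["y"]
--
--     if current:
--         clusters.append(current)
--
--     selected = []
--     for cluster in clusters:
--         cluster.sort(key=lambda c: (c["score"], c["amount"]), reverse=True)
--         best = cluster[0]
--         if best["score"] >= 2:
--             selected.append(best)
--
--     if not selected:
--         candidates.sort(key=lambda c: (c["score"], c["amount"]), reverse=True)
--         selected.append(candidates[0])
--
--     return selected
-- ===== SOURCE B (Python) =====
-- from typing import Any, Dict, List
--
-- def select_totals(candidates: List[Dict[str, Any]], page_height: int) -> List[Dict[str, Any]]:
--     if not candidates: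
--         return []
--
--     candidates.sort(key=lambda c: c["y"])
--     gap = max(80, int(page_height * 0.15))
--
--     # one streaming pass: keep only the running best of the current cluster
--     selected: List[Dict[str, Any]] = []
--     best = None
--     last_y = None
--     for cand in candidates:
--         if last_y is None or cand["y"] - last_y <= gap:
--             if best is None or (cand["score"], cand["amount"]) > (best["score"], best["amount"]):
--                 best = cand
--         else:
--             if best["score"] >= 2:
--                 selected.append(best)
--             best = cand
--         last_y = cand["y"]
--     if best["score"] >= 2:
--         selected.append(best)
--
--     if selected:
--         return selected
--
--     # fallback: first maximum by (score, amount) over the y-sorted list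
--     overall = candidates[0]
--     for cand in candidates[1:]:
--         if (cand["score"], cand["amount"]) > (overall["score"], overall["amount"]):
--             overall = cand
--     return [overall]
-- ===== Notes on version B (the rewrite author's own statement) =====
-- stated objective: alternative
-- what changed: B replaces A's build-list-of-clusters-then-reverse-sort-each-cluster pipeline with a single streaming pass that keeps only the running best of the current cluster, and replaces the fallback re-sort with a running-maximum scan (A additionally re-sorts the argument list in place in the fallback; B does not — return values agree).
import Mathlib
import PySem

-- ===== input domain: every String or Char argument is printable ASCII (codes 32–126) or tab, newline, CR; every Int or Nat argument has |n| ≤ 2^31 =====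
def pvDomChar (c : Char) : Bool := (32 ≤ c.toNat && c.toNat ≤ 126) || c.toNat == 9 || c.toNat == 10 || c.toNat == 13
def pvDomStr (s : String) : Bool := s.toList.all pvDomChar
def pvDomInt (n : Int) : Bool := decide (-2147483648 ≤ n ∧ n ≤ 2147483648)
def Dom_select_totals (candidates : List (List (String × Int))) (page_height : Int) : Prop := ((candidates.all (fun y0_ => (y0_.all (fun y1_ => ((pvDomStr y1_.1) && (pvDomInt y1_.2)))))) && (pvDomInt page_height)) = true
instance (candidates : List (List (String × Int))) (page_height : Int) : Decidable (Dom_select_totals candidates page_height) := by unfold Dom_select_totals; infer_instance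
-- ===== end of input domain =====

-- B streams over the y-sorted candidates keeping only the running best of the current cluster (no
-- list-of-clusters, no per-cluster reverse sort) and uses a running-maximum scan for the fallback.
-- Equivalence is about the RETURN value: both sort `candidates` in place by y, but in the fallback
-- case A additionally re-sorts it by (score, amount) while B leaves it y-sorted.

-- c[k] for the candidate dicts; Pre_ guarantees the key is present, so the `.getD 0` default is
-- never reached on admitted inputs (Python raises KeyError exactly where Pre_ excludes).
def pvKey (c : List (String × Int)) (k : String) : Int := ((PySem.Dict.mk c).get? k).getD 0

-- int(page_height * 0.15), ported by hand: exact integer model of the IEEE-754 double product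
-- (0.15 = 5404319552844595 / 2^55; product rounded to nearest, ties to even, then truncated toward
-- zero).  Exact for |page_height| ≤ 2^31 (checked against CPython).
def pvGapInt (ph : Int) : Int :=
  let v : Nat := ph.natAbs * 5404319552844595
  let e : Nat := PySem.Int.bitLength (v : Int)
  let r : Nat :=
    if e ≤ 53 then v
    else
      let sh := e - 53
      let q := v >>> sh
      let rem := v - (q <<< sh)
      let half := 1 <<< (sh - 1)
      let q := if rem > half ∨ (rem = half ∧ q % 2 = 1) then q + 1 else q
      q <<< sh
  let t : Nat := r >>> 55
  if ph < 0 then -(t : Int) else (t : Int)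

-- ===== PORT A =====
-- body of A's cluster-building loop
def pvStepA (gap : Int)
    (st : List (List (List (String × Int))) × List (List (String × Int)) × Option Int)
    (cand : List (String × Int)) :
    List (List (List (String × Int))) × List (List (String × Int)) × Option Int :=
  match st with
  | (clusters, current, lastY) =>
    match lastY with
    | none => (clusters, current ++ [cand], some (pvKey cand "y"))
    | some ly =>
      if pvKey cand "y" - ly ≤ gap then (clusters, current ++ [cand], some (pvKey cand "y"))
      else (clusters ++ [current], [cand], some (pvKey cand "y"))

-- body of A's selection loop: reverse-sort the cluster, take element 0, keep it if score >= 2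
-- (the `none` arm is the IndexError guard; clusters are never empty)
def pvPickA (sel : List (List (String × Int))) (cluster : List (List (String × Int))) :
    List (List (String × Int)) :=
  match PySem.List.pyGet? (PySem.List.sorted2 cluster (fun c => pvKey c "score") (fun c => pvKey c "amount") true) 0 with
  | none => sel
  | some best => if 2 ≤ pvKey best "score" then sel ++ [best] else sel

def select_totals (candidates : List (List (String × Int))) (page_height : Int) : List (List (String × Int)) :=
  if candidates = [] then []
  else
    let cands := PySem.List.sorted candidates (fun c => pvKey c "y") false
    let gap : Int := max 80 (pvGapInt page_height)
    let st := cands.foldl (pvStepA gap) ([], [], none)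
    let clusters := if st.2.1 = [] then st.1 else st.1 ++ [st.2.1]
    let selected := clusters.foldl pvPickA []
    if selected = [] then
      match PySem.List.pyGet? (PySem.List.sorted2 cands (fun c => pvKey c "score") (fun c => pvKey c "amount") true) 0 with
      | none => selected   -- IndexError guard, unreachable: cands is nonempty here
      | some b => selected ++ [b]
    else selected

-- ===== PORT B =====
-- (cand["score"], cand["amount"]) > (best["score"], best["amount"])  — Python tuple comparison
def pvTupGt (c b : List (String × Int)) : Bool :=
  decide (pvKey b "score" < pvKey c "score") ||
    (decide (pvKey c "score" = pvKey b "score") && decide (pvKey b "amount" < pvKey c "amount"))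

-- body of B's single streaming pass: (selected, best of current cluster, last_y)
def pvStepB (gap : Int)
    (st : List (List (String × Int)) × Option (List (String × Int)) × Option Int)
    (cand : List (String × Int)) :
    List (List (String × Int)) × Option (List (String × Int)) × Option Int :=
  match st with
  | (selected, best, lastY) =>
    let yc := pvKey cand "y"
    let inCluster : Bool := match lastY with | none => true | some ly => decide (yc - ly ≤ gap)
    if inCluster then
      (selected, some (match best with | none => cand | some b => if pvTupGt cand b then cand else b), some yc)
    else
      match best with
      | none => (selected, some cand, some yc)   -- unreachable: best is set after the first element
      | some b => ((if 2 ≤ pvKey b "score" then selected ++ [b] else selected), some cand, some yc)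

def select_totals_alt (candidates : List (List (String × Int))) (page_height : Int) : List (List (String × Int)) :=
  if candidates = [] then []
  else
    let cands := PySem.List.sorted candidates (fun c => pvKey c "y") false
    let gap : Int := max 80 (pvGapInt page_height)
    let st := cands.foldl (pvStepB gap) ([], none, none)
    match st.2.1 with
    | none => []   -- unreachable: cands is nonempty
    | some b =>
      let selected := if 2 ≤ pvKey b "score" then st.1 ++ [b] else st.1
      if selected = [] then
        match cands with
        | [] => []   -- unreachable
        | c0 :: rest => [rest.foldl (fun ov cand => if pvTupGt cand ov then cand else ov) c0]
      else selected

-- ===== PRECONDITION & SPEC =====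
-- Pre_ excludes exactly the inputs where the Python raises KeyError: some candidate lacks one of
-- the keys "y", "score", "amount" (all three are looked up for every candidate).
def Pre_select_totals (candidates : List (List (String × Int))) (page_height : Int) : Prop :=
  candidates.all (fun c => c.any (fun p => p.1 == "y") && c.any (fun p => p.1 == "score") && c.any (fun p => p.1 == "amount")) = true
instance (candidates : List (List (String × Int))) (page_height : Int) : Decidable (Pre_select_totals candidates page_height) := by unfold Pre_select_totals; infer_instance

def pvWitness_select_totals : (List (List (String × Int))) × Int :=
  ([[("y", 10), ("score", 3), ("amount", 100)], [("y", 400), ("score", 2), ("amount", 50)]], 500)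

def Spec_select_totals (candidates : List (List (String × Int))) (page_height : Int) (out : List (List (String × Int))) : Prop := out = select_totals_alt candidates page_height
instance (candidates : List (List (String × Int))) (page_height : Int) (out : List (List (String × Int))) : Decidable (Spec_select_totals candidates page_height out) := by unfold Spec_select_totals; infer_instance

-- ===== CLAIM (what is proved, stated in full; the proofs are below) =====
def Claim_equal_select_totals : Prop := ∀ (candidates : List (List (String × Int))) (page_height : Int), Dom_select_totals candidates page_height → Pre_select_totals candidates page_height → Spec_select_totals candidates page_height (select_totals candidates page_height)

-- ===== LEMMAS AND PROOFS =====

-- the running best of a cluster, as B's streaming update computes it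
def pvRunBest (c0 : List (String × Int)) (cs : List (List (String × Int))) : List (String × Int) :=
  cs.foldl (fun b x => if pvTupGt x b then x else b) c0

-- B's tuple-> test coincides with sorted2's internal "strictly below" relation, flipped
lemma pvTupGt_eq (c b : List (String × Int)) :
    pvTupGt c b = (decide (pvKey b "score" < pvKey c "score") ||
      (!decide (pvKey c "score" < pvKey b "score") && decide (pvKey b "amount" < pvKey c "amount"))) := by
  unfold pvTupGt
  by_cases h1 : pvKey b "score" < pvKey c "score" <;>
    by_cases h2 : pvKey c "score" < pvKey b "score" <;>
      by_cases h3 : pvKey c "score" = pvKey b "score" <;>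
        simp [h1, h2, h3] <;> omega

lemma head?_foldl_insertBy {α : Type} (bf : α → α → Bool) :
    ∀ (l : List α) (m : α) (t : List α),
      (l.foldl (fun acc x => PySem.List.insertBy bf x acc) (m :: t)).head? =
        some (l.foldl (fun b x => if bf x b then x else b) m) := by
  intro l
  induction l with
  | nil => intro m t; rfl
  | cons x l ih =>
    intro m t
    show ((l.foldl _ (PySem.List.insertBy bf x (m :: t)))).head? = _
    have hins : PySem.List.insertBy bf x (m :: t) =
        if bf x m then x :: m :: t else m :: PySem.List.insertBy bf x t := rfl
    by_cases h : bf x m = true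
    · rw [hins]; simp only [h, List.foldl_cons]
      simpa [h] using ih x (m :: t)
    · rw [hins]; simp only [h, List.foldl_cons]
      simpa [h] using ih m (PySem.List.insertBy bf x t)

-- head of A's reverse (score, amount)-sort of a nonempty cluster = B's running best
lemma sorted2_head (c0 : List (String × Int)) (cs : List (List (String × Int))) :
    (PySem.List.sorted2 (c0 :: cs) (fun c => pvKey c "score") (fun c => pvKey c "amount") true).head? =
      some (pvRunBest c0 cs) := by
  show ((c0 :: cs).foldl (fun acc x => PySem.List.insertBy _ x acc) []).head? = _
  rw [List.foldl_cons]
  have h := head?_foldl_insertBy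
    (fun a b => decide (pvKey b "score" < pvKey a "score") ||
      (!decide (pvKey a "score" < pvKey b "score") && decide (pvKey b "amount" < pvKey a "amount")))
    cs c0 []
  have hfun : (fun (b x : List (String × Int)) =>
      if (decide (pvKey b "score" < pvKey x "score") ||
        (!decide (pvKey x "score" < pvKey b "score") && decide (pvKey b "amount" < pvKey x "amount"))) = true
      then x else b) = (fun b x => if pvTupGt x b then x else b) := by
    funext b x; rw [pvTupGt_eq]
  rw [pvRunBest, ← hfun]
  exact h

lemma pickA_eq (sel : List (List (String × Int))) (c0 : List (String × Int)) (cs : List (List (String × Int))) :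
    pvPickA sel (c0 :: cs) =
      (if 2 ≤ pvKey (pvRunBest c0 cs) "score" then sel ++ [pvRunBest c0 cs] else sel) := by
  unfold pvPickA
  rw [PySem.List.pyGet?_zero, ← List.head?_eq_getElem?, sorted2_head]

-- A's end-of-loop processing of its state / B's
def pvFinishA (st : List (List (List (String × Int))) × List (List (String × Int)) × Option Int) :
    List (List (String × Int)) :=
  (if st.2.1 = [] then st.1 else st.1 ++ [st.2.1]).foldl pvPickA []

def pvFinishB (st : List (List (String × Int)) × Option (List (String × Int)) × Option Int) :
    List (List (String × Int)) :=
  match st.2.1 with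
  | none => []
  | some b => if 2 ≤ pvKey b "score" then st.1 ++ [b] else st.1

-- B's loop never loses its running best
lemma stepB_best_some (gap : Int) :
    ∀ (rest : List (List (String × Int))) (sel : List (List (String × Int)))
      (b : List (String × Int)) (ly : Option Int),
      ∃ sel' b' ly', rest.foldl (pvStepB gap) (sel, some b, ly) = (sel', some b', ly') := by
  intro rest
  induction rest with
  | nil => intro sel b ly; exact ⟨sel, b, ly, rfl⟩
  | cons x rest ih =>
    intro sel b ly
    rw [List.foldl_cons]
    cases ly with
    | none => simpa [pvStepB] using ih sel _ _
    | some l =>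
      by_cases h : pvKey x "y" - l ≤ gap
      · simpa [pvStepB, h] using ih sel _ _
      · simpa [pvStepB, h] using ih _ x _

-- the two loops, run from corresponding states, produce the same selection
lemma loop_eq (gap : Int) :
    ∀ (rest : List (List (String × Int))) (cl : List (List (List (String × Int))))
      (c0 : List (String × Int)) (cs : List (List (String × Int)))
      (sel : List (List (String × Int))) (ly : Int),
      sel = cl.foldl pvPickA [] →
      pvFinishA (rest.foldl (pvStepA gap) (cl, c0 :: cs, some ly)) =
        pvFinishB (rest.foldl (pvStepB gap) (sel, some (pvRunBest c0 cs), some ly)) := by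
  intro rest
  induction rest with
  | nil =>
    intro cl c0 cs sel ly hsel
    simp only [List.foldl_nil, pvFinishA, pvFinishB]
    rw [if_neg (by simp)]
    rw [List.foldl_append, ← hsel, List.foldl_cons, List.foldl_nil, pickA_eq]
  | cons x rest ih =>
    intro cl c0 cs sel ly hsel
    rw [List.foldl_cons, List.foldl_cons]
    by_cases h : pvKey x "y" - ly ≤ gap
    · have hA : pvStepA gap (cl, c0 :: cs, some ly) x =
          (cl, c0 :: (cs ++ [x]), some (pvKey x "y")) := by
        simp [pvStepA, h]
      have hB : pvStepB gap (sel, some (pvRunBest c0 cs), some ly) x =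
          (sel, some (pvRunBest c0 (cs ++ [x])), some (pvKey x "y")) := by
        simp only [pvStepB, pvRunBest, List.foldl_append, List.foldl_cons, List.foldl_nil]
        simp [h]
      rw [hA, hB]
      exact ih cl c0 (cs ++ [x]) sel (pvKey x "y") hsel
    · have hA : pvStepA gap (cl, c0 :: cs, some ly) x =
          (cl ++ [c0 :: cs], [x], some (pvKey x "y")) := by
        simp [pvStepA, h]
      have hB : pvStepB gap (sel, some (pvRunBest c0 cs), some ly) x =
          ((if 2 ≤ pvKey (pvRunBest c0 cs) "score" then sel ++ [pvRunBest c0 cs] else sel),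
            some x, some (pvKey x "y")) := by
        simp [pvStepB, h]
      rw [hA, hB]
      have hsel' : (if 2 ≤ pvKey (pvRunBest c0 cs) "score" then sel ++ [pvRunBest c0 cs] else sel) =
          (cl ++ [c0 :: cs]).foldl pvPickA [] := by
        rw [List.foldl_append, ← hsel, List.foldl_cons, List.foldl_nil, pickA_eq]
      have := ih (cl ++ [c0 :: cs]) x []
        (if 2 ≤ pvKey (pvRunBest c0 cs) "score" then sel ++ [pvRunBest c0 cs] else sel)
        (pvKey x "y") hsel'
      simpa [pvRunBest] using this

-- ===== VERDICT (by name: the statement is the Claim_ definition above) =====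
theorem select_totals_spec : Claim_equal_select_totals := by
  intro candidates page_height _ _
  unfold Spec_select_totals select_totals select_totals_alt
  by_cases hc : candidates = []
  · simp [hc]
  · rw [if_neg hc, if_neg hc]
    have hne : PySem.List.sorted candidates (fun c => pvKey c "y") false ≠ [] := by
      rw [Ne, PySem.List.sorted_eq_nil_iff]; exact hc
    obtain ⟨c0, rest, hcands⟩ : ∃ c0 rest,
        PySem.List.sorted candidates (fun c => pvKey c "y") false = c0 :: rest := by
      cases h : PySem.List.sorted candidates (fun c => pvKey c "y") false with
      | nil => exact absurd h hne
      | cons a t => exact ⟨a, t, rfl⟩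
    rw [hcands]
    simp only [] -- zeta-reduce the lets
    set gap : Int := max 80 (pvGapInt page_height) with hgap
    -- peel the first iteration of each loop
    rw [List.foldl_cons, List.foldl_cons]
    have hA0 : pvStepA gap ([], [], none) c0 = ([], [c0], some (pvKey c0 "y")) := by
      simp [pvStepA]
    have hB0 : pvStepB gap ([], none, none) c0 = ([], some c0, some (pvKey c0 "y")) := by
      simp [pvStepB]
    rw [hA0, hB0]
    have hmain := loop_eq gap rest [] c0 [] [] (pvKey c0 "y") rfl
    simp only [pvRunBest, List.foldl_nil] at hmain
    -- name the loop results
    set stA := rest.foldl (pvStepA gap) ([], [c0], some (pvKey c0 "y")) with hstA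
    set stB := rest.foldl (pvStepB gap) ([], some c0, some (pvKey c0 "y")) with hstB
    simp only [pvFinishA, pvFinishB] at hmain
    cases hbest : stB.2.1 with
    | none =>
      obtain ⟨sel', b', ly', heq⟩ := stepB_best_some gap rest [] c0 (some (pvKey c0 "y"))
      rw [hstB, heq] at hbest
      simp at hbest
    | some b =>
      rw [hbest] at hmain
      simp only [] at hmain ⊢
      rw [hmain]
      by_cases hsel : (if 2 ≤ pvKey b "score" then stB.1 ++ [b] else stB.1) = []
      · rw [if_pos hsel, if_pos hsel]
        rw [PySem.List.pyGet?_zero, ← List.head?_eq_getElem?, sorted2_head]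
        simp only [hsel, pvRunBest]
        simp
      · rw [if_neg hsel, if_neg hsel]
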